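-- pv_equiv track=rewrite | github.com/polmontou/advent_of_code | src/day2/day2-1.py | find_biggest_color_draw
-- ===== SOURCE A (Python) =====
-- digits = [0,1,2,3,4,5,6,7,8,9]
--
-- def find_int_backward (text, index):
--     int_backward = ""
--     int_forward = ""
--     i = index
--     founded_int_once = False
--     stop = False
--
--     while i != -1 and not stop:
--         digit_found = False
--
--         for j, digit in enumerate(digits):
--             if  str(digit) == text[i]:
--                 int_backward += text[i]
--                 digit_found = True
--                 founded_int_once = True
--                 break
--
--         if founded_int_once:
--             if not digit_found:
--                 stop = True
--         i -= 1
--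
--     i = len(int_backward)-1
--     while i != -1:
--         int_forward += int_backward[i]
--         i -=1
--
--     return int(int_forward)
--
-- def find_biggest_color_draw(text, color_searched):
--     biggest_color_draw = 0
--
--     for i in range(len(text)):
--         color_found = True
--
--         for j, letter in enumerate(color_searched):
--             if i+j < len(text) and text[i+j] != letter:
--                 color_found = False
--         if color_found:
--             value_corresponding = find_int_backward(text, i)
--             if value_corresponding > biggest_color_draw:
--                 biggest_color_draw = value_corresponding
--
--     return biggest_color_draw
-- ===== SOURCE B (Python) =====
-- def find_biggest_color_draw(text, color_searched):
--     # one forward pass: prev[k] = the nearest digit run ending at or before k (None if none yet)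
--     prev = []
--     run = None
--     for k, ch in enumerate(text):
--         if ch.isdigit():
--             run = run + ch if (k > 0 and text[k - 1].isdigit()) else ch
--         prev.append(run)
--     best = 0
--     for i in range(len(text)):
--         if text.startswith(color_searched, i):
--             v = int(prev[i])
--             if v > best:
--                 best = v
--     return best
-- ===== Notes on version B (the rewrite author's own statement) =====
-- stated objective: faster
-- what changed: A rescans backwards through the text (with a 10-way digit comparison per character) at every match position and rebuilds the number by an explicit reversal loop, and its bounds-checked comparison also accepts an occurrence truncated by the end of the text; B makes one forward pass that tabulates the nearest preceding digit run for every position and tests full occurrences with text.startswith(color_searched, i), so each match costs an O(1) table lookup; …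
-- outside the precondition, e.g. on find_biggest_color_draw('7 re', 'red'): A returns 7, B returns 0; on find_biggest_color_draw('0 re', 'red'): A returns 0, B returns 0
import Mathlib
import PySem

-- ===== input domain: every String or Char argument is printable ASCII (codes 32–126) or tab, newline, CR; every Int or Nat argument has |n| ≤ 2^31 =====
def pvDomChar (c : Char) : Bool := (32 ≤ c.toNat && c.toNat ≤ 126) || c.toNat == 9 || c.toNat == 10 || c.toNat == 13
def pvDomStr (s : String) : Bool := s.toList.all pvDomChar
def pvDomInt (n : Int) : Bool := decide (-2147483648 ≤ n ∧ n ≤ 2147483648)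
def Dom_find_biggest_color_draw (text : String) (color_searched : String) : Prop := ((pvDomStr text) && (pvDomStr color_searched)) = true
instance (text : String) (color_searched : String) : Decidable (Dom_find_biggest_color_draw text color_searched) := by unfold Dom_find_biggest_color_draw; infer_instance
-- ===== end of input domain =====

-- B replaces A's per-position backward digit scans by one forward pass building a table of
-- nearest-preceding digit runs and tests matches with startswith (faster); Pre_ excludes the
-- corner where the text ends inside a potential occurrence of the pattern (see Pre_ below).

-- ===== PORT A =====

-- digits = [0,1,2,3,4,5,6,7,8,9]
def pvDigitsA : List Int := [0, 1, 2, 3, 4, 5, 6, 7, 8, 9]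

-- inner 'for j, digit in enumerate(digits): if str(digit) == text[i]: … break' loop of
-- find_int_backward; returns (int_backward, digit_found, founded_int_once) after the loop
def pvDigitScan (ds : List (Int × Int)) (c : Char) (acc : List Char) (founded : Bool) :
    List Char × Bool × Bool :=
  match ds with
  | [] => (acc, false, founded)
  | (_, d) :: rest =>
      if PySem.Int.toChars d = [c] then (acc ++ [c], true, true)  -- break
      else pvDigitScan rest c acc founded

-- first 'while i != -1 and not stop' loop of find_int_backward (i is the current index;
-- the index is always in range here, so text[i] is pyGetD with an unused default)
def pvFibLoop (t : List Char) : Nat → List Char → Bool → List Char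
  | 0, acc, founded =>
      -- after the body at i = 0, i becomes -1 and the loop exits whatever 'stop' is
      (pvDigitScan (PySem.List.enumerate pvDigitsA) (PySem.List.pyGetD t ((0 : Nat) : Int) ' ') acc founded).1
  | (i + 1), acc, founded =>
      let r := pvDigitScan (PySem.List.enumerate pvDigitsA) (PySem.List.pyGetD t ((i + 1 : Nat) : Int) ' ') acc founded
      -- r = (int_backward, digit_found, founded_int_once); stop ↔ founded ∧ ¬ digit_found
      if r.2.2 = true ∧ r.2.1 = false then r.1 else pvFibLoop t i r.1 r.2.2

-- second 'while i != -1' loop of find_int_backward (builds int_forward backwards)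
def pvRevLoop (s : List Char) : Nat → List Char → List Char
  | 0, acc => acc ++ [PySem.List.pyGetD s ((0 : Nat) : Int) ' ']
  | (i + 1), acc => pvRevLoop s i (acc ++ [PySem.List.pyGetD s ((i + 1 : Nat) : Int) ' '])

-- find_int_backward(text, index); none = ValueError from int(''), excluded by Pre_
def pvFindIntBackward (t : List Char) (index : Nat) : Option Int :=
  let int_backward := pvFibLoop t index [] false
  let int_forward :=
    if int_backward.length = 0 then [] else pvRevLoop int_backward (int_backward.length - 1) []
  PySem.Int.ofChars? int_forward

def find_biggest_color_draw (text : String) (color_searched : String) : Int :=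
  let t := text.toList
  let p := color_searched.toList
  (List.range t.length).foldl
    (fun (biggest : Int) (i : Nat) =>
      -- 'for j, letter in enumerate(color_searched)' with no break: a plain fold over color_found
      let color_found := (PySem.List.enumerate p).foldl
        (fun cf jl =>
          if (i : Int) + jl.1 < (t.length : Int) ∧ PySem.List.pyGetD t ((i : Int) + jl.1) ' ' ≠ jl.2
          then false else cf) true
      if color_found then
        let v := (pvFindIntBackward t i).getD 0  -- none = ValueError, excluded by Pre_
        if biggest < v then v else biggest
      else biggest) 0

-- ===== PORT B =====

def find_biggest_color_draw_alt (text : String) (color_searched : String) : Int :=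
  let t := text.toList
  let p := color_searched.toList
  let n := t.length
  -- one forward pass: prev[k] = nearest digit run ending at or before k (none if none yet)
  let prev := ((PySem.List.enumerate t).foldl
    (fun (st : List (Option (List Char)) × Option (List Char)) kc =>
      let run :=
        if PySem.Chars.isdigit kc.2 then
          some (if 0 < kc.1 ∧ PySem.Chars.isdigit (PySem.List.pyGetD t (kc.1 - 1) ' ')
                then (st.2.getD []) ++ [kc.2] else [kc.2])
        else st.2
      (st.1 ++ [run], run)) ([], none)).1
  (List.range n).foldl
    (fun (best : Int) (i : Nat) =>
      -- text.startswith(color_searched, i): exact for the 0 ≤ i < n produced by range(n)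
      if PySem.Chars.startswith (List.drop i t) p then
        -- int(prev[i]); prev[i] = None raises TypeError, excluded by Pre_
        let v := ((PySem.List.pyGetD prev ((i : Nat) : Int) none).bind PySem.Int.ofChars?).getD 0
        if best < v then v else best
      else best) 0

-- ===== PRECONDITION & SPEC =====
-- Pre_ excludes (a) the inputs on which A raises ValueError (int('')): an occurrence of the
-- pattern with no digit at or before it; and (b) texts ending with a nonempty proper prefix of
-- color_searched, i.e. texts that end inside a potential occurrence: whether such a trailing
-- partial occurrence counts is a corner no caller specifies (A counts it, B does not).
def Pre_find_biggest_color_draw (text : String) (color_searched : String) : Prop :=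
  (¬ ∃ i < text.toList.length,
      text.toList.length - i < color_searched.toList.length ∧
      text.toList.drop i <+: color_searched.toList) ∧
  ∀ i < text.toList.length,
    color_searched.toList <+: text.toList.drop i →
    ∃ j ≤ i, PySem.Chars.isdigit (text.toList.getD j ' ') = true
instance (text : String) (color_searched : String) : Decidable (Pre_find_biggest_color_draw text color_searched) := by
  unfold Pre_find_biggest_color_draw; infer_instance

def pvWitness_find_biggest_color_draw : String × String := ("3 red", "red")

def Spec_find_biggest_color_draw (text : String) (color_searched : String) (out : Int) : Prop := out = find_biggest_color_draw_alt text color_searched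
instance (text : String) (color_searched : String) (out : Int) : Decidable (Spec_find_biggest_color_draw text color_searched out) := by unfold Spec_find_biggest_color_draw; infer_instance

-- ===== CLAIM (what is proved, stated in full; the proofs are below) =====
def Claim_equal_find_biggest_color_draw : Prop := ∀ (text : String) (color_searched : String), Dom_find_biggest_color_draw text color_searched → Pre_find_biggest_color_draw text color_searched → Spec_find_biggest_color_draw text color_searched (find_biggest_color_draw text color_searched)

-- ===== LEMMAS AND PROOFS =====

-- the nearest digit run ending at or before index i (shared specification of both sides)
def pvRunO (t : List Char) : Nat → Option (List Char)
  | 0 => if PySem.Chars.isdigit (t.getD 0 ' ') then some [t.getD 0 ' '] else none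
  | (i + 1) =>
      if PySem.Chars.isdigit (t.getD (i + 1) ' ') then
        some ((if PySem.Chars.isdigit (t.getD i ' ') then (pvRunO t i).getD [] else []) ++ [t.getD (i + 1) ' '])
      else pvRunO t i

-- the digit run ending at i, backwards (what pvFibLoop collects once a digit was found)
def pvRevRun (t : List Char) : Nat → List Char
  | 0 => if PySem.Chars.isdigit (t.getD 0 ' ') then [t.getD 0 ' '] else []
  | (i + 1) => if PySem.Chars.isdigit (t.getD (i + 1) ' ') then t.getD (i + 1) ' ' :: pvRevRun t i else []

theorem pvDigit_cases (c : Char) (h : PySem.Chars.isdigit c = true) :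
    c = '0' ∨ c = '1' ∨ c = '2' ∨ c = '3' ∨ c = '4' ∨ c = '5' ∨ c = '6' ∨ c = '7' ∨ c = '8' ∨ c = '9' := by
  have h1 : '0' ≤ c ∧ c ≤ '9' := by simpa [PySem.Chars.isdigit] using h
  have h2 : 48 ≤ c.toNat ∧ c.toNat ≤ 57 := by
    obtain ⟨a, b⟩ := h1
    rw [Char.le_def] at a b
    exact ⟨a, b⟩
  have hv : c.toNat = 48 ∨ c.toNat = 49 ∨ c.toNat = 50 ∨ c.toNat = 51 ∨ c.toNat = 52 ∨ c.toNat = 53 ∨ c.toNat = 54 ∨ c.toNat = 55 ∨ c.toNat = 56 ∨ c.toNat = 57 := by omega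
  have hc : ∀ m : Nat, c.toNat = m → c = Char.ofNat m := by
    intro m hm; subst hm; simp [Char.ofNat_toNat]
  rcases hv with h|h|h|h|h|h|h|h|h|h <;> simp [hc _ h]

theorem pvDigitScan_eq (c : Char) (acc : List Char) (f : Bool) :
    pvDigitScan (PySem.List.enumerate pvDigitsA) c acc f =
      if PySem.Chars.isdigit c then (acc ++ [c], true, true) else (acc, false, f) := by
  have he : PySem.List.enumerate pvDigitsA =
      [(0,0),(1,1),(2,2),(3,3),(4,4),(5,5),(6,6),(7,7),(8,8),(9,9)] := by decide
  rw [he]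
  by_cases h : PySem.Chars.isdigit c = true
  · rcases pvDigit_cases c h with h'|h'|h'|h'|h'|h'|h'|h'|h'|h' <;> subst h' <;> rfl
  · have hne : ∀ d : Int, d ∈ ([0,1,2,3,4,5,6,7,8,9] : List Int) → ¬ (PySem.Int.toChars d = [c]) := by
      intro d hd hc
      apply h
      have : c = (PySem.Int.toChars d).getD 0 ' ' := by rw [hc]; rfl
      subst this
      fin_cases hd <;> decide
    simp only [pvDigitScan, Bool.not_eq_true] at *
    rw [if_neg (hne 0 (by decide)), if_neg (hne 1 (by decide)), if_neg (hne 2 (by decide)),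
        if_neg (hne 3 (by decide)), if_neg (hne 4 (by decide)), if_neg (hne 5 (by decide)),
        if_neg (hne 6 (by decide)), if_neg (hne 7 (by decide)), if_neg (hne 8 (by decide)),
        if_neg (hne 9 (by decide)), if_neg (by simp [h])]

theorem pvFibLoop_true (t : List Char) (i : Nat) : ∀ acc : List Char,
    pvFibLoop t i acc true = acc ++ pvRevRun t i := by
  induction i with
  | zero =>
      intro acc
      simp only [pvFibLoop, pvRevRun, pvDigitScan_eq, PySem.List.pyGetD_natCast]
      split_ifs <;> simp
  | succ i ih =>
      intro acc
      simp only [pvFibLoop, pvRevRun, pvDigitScan_eq, PySem.List.pyGetD_natCast]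
      by_cases hd : PySem.Chars.isdigit (t.getD (i + 1) ' ') = true <;>
        simp only [List.getD_eq_getElem?_getD] at hd
      · simp [hd, ih]
      · simp [hd]

theorem pvRevRun_nil (t : List Char) (i : Nat) (h : ¬ PySem.Chars.isdigit (t.getD i ' ') = true) :
    pvRevRun t i = [] := by
  cases i <;> · simp only [List.getD_eq_getElem?_getD] at h; simp [pvRevRun, h, List.getD_eq_getElem?_getD]

theorem pvRevRun_eq (t : List Char) (i : Nat) (h : PySem.Chars.isdigit (t.getD i ' ') = true) :
    pvRevRun t i = ((pvRunO t i).getD []).reverse := by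
  induction i with
  | zero =>
      simp only [List.getD_eq_getElem?_getD] at h
      simp [pvRevRun, pvRunO, h, List.getD_eq_getElem?_getD]
  | succ i ih =>
      by_cases hd : PySem.Chars.isdigit (t.getD i ' ') = true
      · have e := ih hd
        simp only [List.getD_eq_getElem?_getD] at h hd
        simp [pvRevRun, pvRunO, h, hd, e, List.getD_eq_getElem?_getD]
      · have e := pvRevRun_nil t i hd
        have hd' := hd
        simp only [List.getD_eq_getElem?_getD] at h hd'
        simp [pvRevRun, pvRunO, h, hd', e, List.getD_eq_getElem?_getD]

theorem pvFibLoop_false (t : List Char) (i : Nat) :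
    pvFibLoop t i [] false = ((pvRunO t i).getD []).reverse := by
  induction i with
  | zero =>
      simp only [pvFibLoop, pvRunO, pvDigitScan_eq, PySem.List.pyGetD_natCast]
      split_ifs <;> simp
  | succ i ih =>
      simp only [pvFibLoop, pvDigitScan_eq, PySem.List.pyGetD_natCast]
      by_cases hd : PySem.Chars.isdigit (t.getD (i + 1) ' ') = true
      · have h2 := pvRevRun_eq t (i + 1) hd
        simp only [List.getD_eq_getElem?_getD] at hd
        simp [hd, pvFibLoop_true, ← h2, pvRevRun, List.getD_eq_getElem?_getD]
      · have hd' := hd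
        simp only [List.getD_eq_getElem?_getD] at hd'
        simp [hd', ih, pvRunO, List.getD_eq_getElem?_getD]

theorem pvRevLoop_eq (s : List Char) (i : Nat) (hi : i < s.length) : ∀ acc : List Char,
    pvRevLoop s i acc = acc ++ (s.take (i + 1)).reverse := by
  induction i with
  | zero =>
      intro acc
      cases s with
      | nil => simp at hi
      | cons a s' => simp [pvRevLoop]
  | succ i ih =>
      intro acc
      have hi' : i < s.length := Nat.lt_of_succ_lt hi
      have step : pvRevLoop s (i + 1) acc = pvRevLoop s i (acc ++ [s[i + 1]?.getD ' ']) := by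
        simp only [pvRevLoop, PySem.List.pyGetD_natCast, List.getD_eq_getElem?_getD]
      rw [step, ih hi']
      simp [List.take_add_one, List.getElem?_eq_getElem hi]

theorem pvRunO_ne_nil (t : List Char) (i : Nat) : ∀ rs : List Char, pvRunO t i = some rs →
    rs ≠ [] := by
  induction i with
  | zero =>
      intro rs h
      simp only [pvRunO] at h
      split_ifs at h
      · obtain rfl := Option.some_inj.mp h
        simp
  | succ i ih =>
      intro rs h
      simp only [pvRunO] at h
      split_ifs at h
      · obtain rfl := Option.some_inj.mp h
        simp
      · obtain rfl := Option.some_inj.mp h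
        simp
      · exact ih rs h

theorem pvFindIntBackward_eq (t : List Char) (i : Nat) :
    pvFindIntBackward t i = PySem.Int.ofChars? ((pvRunO t i).getD []) := by
  unfold pvFindIntBackward
  rw [pvFibLoop_false]
  cases hR : pvRunO t i with
  | none => simp
  | some rs =>
      have hne : rs ≠ [] := pvRunO_ne_nil t i rs hR
      have hpos : 0 < rs.length := List.length_pos_of_ne_nil hne
      have hlen : rs.reverse.length ≠ 0 := by simp; omega
      simp only [Option.getD_some, if_neg hlen]
      rw [pvRevLoop_eq rs.reverse (rs.reverse.length - 1) (by simp; omega)]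
      have h2 : rs.reverse.length - 1 + 1 = rs.reverse.length := by simp; omega
      rw [h2, List.take_length, List.reverse_reverse]
      simp

-- the fold invariant behind B's prev table
theorem pvPrev_aux (t : List Char) : ∀ j, j ≤ t.length →
    (((PySem.List.enumerate t).take j).foldl
      (fun (st : List (Option (List Char)) × Option (List Char)) kc =>
        let run :=
          if PySem.Chars.isdigit kc.2 then
            some (if 0 < kc.1 ∧ PySem.Chars.isdigit (PySem.List.pyGetD t (kc.1 - 1) ' ')
                  then (st.2.getD []) ++ [kc.2] else [kc.2])
          else st.2
        (st.1 ++ [run], run)) ([], none)) =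
    ((List.range j).map (fun k => pvRunO t k), if j = 0 then none else pvRunO t (j - 1)) := by
  intro j
  induction j with
  | zero => intro _; simp
  | succ j ih =>
      intro hj
      have hj' : j ≤ t.length := Nat.le_of_succ_le hj
      have hjlt : j < t.length := hj
      have hlen : j < (PySem.List.enumerate t).length := by
        rw [PySem.List.length_enumerate]; exact hjlt
      have htake : (PySem.List.enumerate t).take (j + 1) =
          (PySem.List.enumerate t).take j ++ [((j : Int), t[j])] := by
        rw [List.take_add_one, List.getElem?_eq_getElem hlen, PySem.List.getElem_enumerate]
        simp
      rw [htake, List.foldl_append, ih hj']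
      have hrun : (if PySem.Chars.isdigit t[j] then
            some (if 0 < j ∧ PySem.Chars.isdigit (PySem.List.pyGetD t ((j : Int) - 1) ' ')
                  then (((if j = 0 then none else pvRunO t (j - 1)) : Option (List Char)).getD []) ++ [t[j]]
                  else [t[j]])
          else (if j = 0 then none else pvRunO t (j - 1))) = pvRunO t j := by
        cases j with
        | zero =>
            simp only [pvRunO]
            have hg : t[0]?.getD ' ' = t[0] := by
              rw [List.getElem?_eq_getElem hjlt]; rfl
            simp [hg, List.getD_eq_getElem?_getD]
        | succ j' =>
            have hj'' : j' < t.length := by omega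
            have hc : ((j' + 1 : Nat) : Int) - 1 = ((j' : Nat) : Int) := by push_cast; ring
            have hg1 : t[j' + 1]?.getD ' ' = t[j' + 1] := by
              rw [List.getElem?_eq_getElem hjlt]; rfl
            have hg2 : t[j']?.getD ' ' = t[j'] := by
              rw [List.getElem?_eq_getElem hj'']; rfl
            simp only [pvRunO, hc, PySem.List.pyGetD_natCast, List.getD_eq_getElem?_getD, hg1, hg2]
            have hpos : 0 < j' + 1 := by omega
            simp only [hpos, true_and, Nat.add_sub_cancel]
            split_ifs <;> simp_all
      rw [List.range_succ]
      simp only [List.foldl_cons, List.foldl_nil, List.map_append, List.map_cons, List.map_nil]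
      refine Prod.ext ?_ ?_ <;> simp [hrun]

-- B's table: entry i is pvRunO t i
theorem pvPrev_eq (t : List Char) (i : Nat) (hi : i < t.length) :
    PySem.List.pyGetD
      (((PySem.List.enumerate t).foldl
        (fun (st : List (Option (List Char)) × Option (List Char)) kc =>
          let run :=
            if PySem.Chars.isdigit kc.2 then
              some (if 0 < kc.1 ∧ PySem.Chars.isdigit (PySem.List.pyGetD t (kc.1 - 1) ' ')
                    then (st.2.getD []) ++ [kc.2] else [kc.2])
            else st.2
          (st.1 ++ [run], run)) ([], none)).1) ((i : Nat) : Int) none = pvRunO t i := by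
  have h := pvPrev_aux t t.length le_rfl
  rw [List.take_of_length_le (by rw [PySem.List.length_enumerate])] at h
  rw [congrArg Prod.fst h, PySem.List.pyGetD_natCast, List.getD_eq_getElem?_getD,
      List.getElem?_map, List.getElem?_range hi]
  rfl

-- A's inner letter loop = prefix test on a slice
theorem pvFoldFalse {α : Type} (l : List α) (P : α → Prop) [DecidablePred P] : ∀ b : Bool,
    l.foldl (fun cf x => if P x then false else cf) b = (b && l.all fun x => !(decide (P x))) := by
  induction l with
  | nil => intro b; simp
  | cons a l ih =>
      intro b
      simp only [List.foldl_cons, List.all_cons, ih]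
      by_cases h : P a <;> simp [h]

theorem pvPrefix_char (s p : List Char) (h : s.length ≤ p.length) :
    s <+: p ↔ ∀ k (hk : k < s.length), s[k] = p[k]'(Nat.lt_of_lt_of_le hk h) := by
  rw [List.prefix_iff_eq_take]
  constructor
  · intro he k hk
    have h2 := congrArg (fun l => l[k]?) he
    simp only [List.getElem?_take] at h2
    rw [List.getElem?_eq_getElem hk, List.getElem?_eq_getElem (Nat.lt_of_lt_of_le hk h)] at h2
    simp [hk] at h2
    exact h2
  · intro hk
    apply List.ext_getElem (by simp [Nat.min_eq_left h])
    intro k h1 h2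
    rw [List.getElem_take]
    exact hk k h1

theorem pvMatch_eq (t p : List Char) (i : Nat) :
    ((PySem.List.enumerate p).foldl
      (fun cf jl =>
        if (i : Int) + jl.1 < (t.length : Int) ∧ PySem.List.pyGetD t ((i : Int) + jl.1) ' ' ≠ jl.2
        then false else cf) true) =
    PySem.Chars.startswith p (PySem.List.slice t (some (i : Int)) (some ((i : Int) + (p.length : Int)))) := by
  have hcast : ((i : Int) + (p.length : Int)) = ((i + p.length : Nat) : Int) := by push_cast; ring
  rw [hcast, PySem.List.slice_natCast, Nat.add_sub_cancel_left]
  rw [pvFoldFalse (PySem.List.enumerate p)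
    (fun jl => (i : Int) + jl.1 < (t.length : Int) ∧ PySem.List.pyGetD t ((i : Int) + jl.1) ' ' ≠ jl.2) true]
  rw [Bool.eq_iff_iff]
  rw [Bool.true_and, List.all_eq_true, PySem.Chars.startswith_iff]
  have hlen : (List.take p.length (List.drop i t)).length ≤ p.length := by simp
  rw [pvPrefix_char _ p hlen]
  constructor
  · intro hall k hk
    have hk' : k < p.length ∧ k < t.length - i := by simpa using hk
    have hin : ((0 : Int) + (k : Nat), p[k]) ∈ PySem.List.enumerate p := by
      rw [PySem.List.mem_enumerate_iff]
      exact ⟨k, hk'.1, rfl⟩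
    have := hall _ hin
    simp only [Bool.not_eq_eq_eq_not, Bool.not_true, decide_eq_false_iff_not] at this
    rw [List.getElem_take, List.getElem_drop]
    have hrange : i + k < t.length := by omega
    have hget : PySem.List.pyGetD t ((i : Int) + ((0 : Int) + (k : Nat))) ' ' = t[i + k] := by
      rw [show ((i : Int) + ((0 : Int) + (k : Nat))) = ((i + k : Nat) : Int) by push_cast; ring,
          PySem.List.pyGetD_natCast, List.getD_eq_getElem?_getD, List.getElem?_eq_getElem hrange]
      rfl
    by_contra hne
    exact this ⟨by omega, by rw [hget]; exact fun he => hne he⟩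
  · intro hpre x hx
    rw [PySem.List.mem_enumerate_iff] at hx
    obtain ⟨k, hk, rfl⟩ := hx
    simp only [Bool.not_eq_eq_eq_not, Bool.not_true, decide_eq_false_iff_not]
    rintro ⟨hlt, hne⟩
    have hrange : i + k < t.length := by omega
    have hklen : k < (List.take p.length (List.drop i t)).length := by
      simp only [List.length_take, List.length_drop]
      omega
    have := hpre k hklen
    rw [List.getElem_take, List.getElem_drop] at this
    have hget : PySem.List.pyGetD t ((i : Int) + ((0 : Int) + (k : Nat))) ' ' = t[i + k] := by
      rw [show ((i : Int) + ((0 : Int) + (k : Nat))) = ((i + k : Nat) : Int) by push_cast; ring,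
          PySem.List.pyGetD_natCast, List.getD_eq_getElem?_getD, List.getElem?_eq_getElem hrange]
      rfl
    exact hne (by rw [hget, this])

-- outside D_, A's (possibly truncated) slice test coincides with B's full startswith test
theorem pvCond_eq (t p : List Char) (i : Nat) (hi : i < t.length)
    (hD : ¬ ∃ i' < t.length, t.length - i' < p.length ∧ t.drop i' <+: p) :
    PySem.Chars.startswith p (PySem.List.slice t (some (i : Int)) (some ((i : Int) + (p.length : Int)))) =
    PySem.Chars.startswith (List.drop i t) p := by
  have hcast : ((i : Int) + (p.length : Int)) = ((i + p.length : Nat) : Int) := by push_cast; ring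
  rw [hcast, PySem.List.slice_natCast, Nat.add_sub_cancel_left, Bool.eq_iff_iff,
      PySem.Chars.startswith_iff, PySem.Chars.startswith_iff]
  by_cases hc : i + p.length ≤ t.length
  · -- full-length slice: both sides say the slice equals p
    have hlen : (List.take p.length (List.drop i t)).length = p.length := by
      simp [List.length_take, List.length_drop]; omega
    constructor
    · intro h
      have he : List.take p.length (List.drop i t) = p := h.eq_of_length (by rw [hlen])
      exact he ▸ List.take_prefix p.length (List.drop i t)
    · intro h
      have he := List.prefix_iff_eq_take.mp h
      rw [← he]
  · -- truncated slice: both sides are false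
    constructor
    · intro h
      exfalso
      apply hD
      refine ⟨i, hi, by omega, ?_⟩
      have : List.take p.length (List.drop i t) = List.drop i t := by
        apply List.take_of_length_le
        simp [List.length_drop]; omega
      rwa [this] at h
    · intro h
      exfalso
      have := h.length_le
      simp [List.length_drop] at this
      omega

-- ===== VERDICT (by name: the statement is the Claim_ definition above) =====
theorem find_biggest_color_draw_spec : Claim_equal_find_biggest_color_draw := by
  intro text color_searched _ hPre
  unfold Spec_find_biggest_color_draw find_biggest_color_draw find_biggest_color_draw_alt
  apply PySem.List.foldl_congr_mem
  intro acc i hi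
  have hin : i < text.toList.length := List.mem_range.mp hi
  rw [pvMatch_eq, pvCond_eq text.toList color_searched.toList i hin hPre.1,
      pvFindIntBackward_eq, pvPrev_eq text.toList i hin]
  have hnil : PySem.Int.ofChars? [] = none := rfl
  cases hR : pvRunO text.toList i <;> simp [hnil]
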